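-- pv_equiv track=rewrite | github.com/EverGrayTech/plot-your-path | src/backend/services/title_normalizer.py | _extract_rank_and_remainder
-- ===== SOURCE A (Python) =====
-- from contextlib import suppress
--
-- RANK_TITLES: tuple[str, ...] = (
--     "architect",
--     "director",
--     "engineer",
--     "head",
--     "lead",
--     "manager",
--     "officer",
--     "president",
-- )
--
-- def _extract_rank_and_remainder(title: str) -> tuple[str, str] | None:
--     words = title.split()
--
--     with suppress(ValueError):
--         index = max([i for i, word in enumerate(words, 1) if word.lower() in RANK_TITLES])
--         rank = " ".join(words[:index])
--         department = " ".join(words[index:])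
--         if department.lower().startswith("of "):
--             department = department[3:]
--
--         return rank, department
-- ===== SOURCE B (Python) =====
-- RANK_TITLES: tuple[str, ...] = (
--     "architect",
--     "director",
--     "engineer",
--     "head",
--     "lead",
--     "manager",
--     "officer",
--     "president",
-- )
--
--
-- def _extract_rank_and_remainder(title: str) -> tuple[str, str] | None:
--     # One forward pass maintaining the split itself: no indices, no slicing.
--     rank_words: list[str] = []
--     pending: list[str] = []
--     for word in title.split():
--         pending.append(word)
--         if word.lower() in RANK_TITLES:
--             rank_words += pending
--             pending = []
--     if not rank_words:
--         return None
--     rank = " ".join(rank_words)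
--     department = " ".join(pending)
--     if department.lower().startswith("of "):
--         department = department[3:]
--     return rank, department
-- ===== Notes on version B (the rewrite author's own statement) =====
-- stated objective: alternative
-- what changed: A enumerates 1-based indices of all rank words, takes max() under a suppressed ValueError and slices the word list at that index; B never computes an index at all: a single forward pass keeps two accumulators (rank_words, pending), flushing pending into rank_words each time a rank word is seen, so the final accumulators are exactly the two halves.
import Mathlib
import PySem

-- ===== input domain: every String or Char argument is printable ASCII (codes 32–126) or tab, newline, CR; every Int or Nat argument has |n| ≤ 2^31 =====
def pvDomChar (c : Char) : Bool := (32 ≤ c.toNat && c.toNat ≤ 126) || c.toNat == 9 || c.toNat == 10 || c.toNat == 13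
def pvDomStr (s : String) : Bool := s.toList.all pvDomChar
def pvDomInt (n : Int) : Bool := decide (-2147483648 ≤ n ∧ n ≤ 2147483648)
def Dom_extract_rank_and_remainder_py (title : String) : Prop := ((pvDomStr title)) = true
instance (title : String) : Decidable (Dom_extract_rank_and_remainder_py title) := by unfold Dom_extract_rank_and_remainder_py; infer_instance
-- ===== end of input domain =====

-- B replaces A's build-all-matching-indices/max()/slice scheme by a single forward pass with
-- two accumulators that maintain the rank/department split directly (no indices, no slicing);
-- objective: alternative. Same return value.

-- ===== PORT A =====
def RANK_TITLES : List String :=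
  ["architect", "director", "engineer", "head", "lead", "manager", "officer", "president"]

def extract_rank_and_remainder_py (title : String) : Option (String × String) :=
  let words := PySem.Str.split₀ title
  -- [i for i, word in enumerate(words, 1) if word.lower() in RANK_TITLES]
  let idxs := (PySem.List.enumerate words 1).filterMap
    (fun iw => if RANK_TITLES.contains (PySem.Str.lower iw.2) then some iw.1 else none)
  -- max(...) raises ValueError on []; 'with suppress(ValueError)' then falls through to None
  match PySem.List.max? idxs (fun i => i) with
  | none => none
  | some index =>
    let rank := PySem.Str.join " " (PySem.List.slice words none (some index))
    let department := PySem.Str.join " " (PySem.List.slice words (some index) none)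
    let department :=
      if PySem.Str.startswith (PySem.Str.lower department) "of " then
        PySem.Str.slice department (some 3) none
      else department
    some (rank, department)

-- ===== PORT B =====
-- loop body: pending.append(word); if rank word: rank_words += pending; pending = []
def altStep (st : List String × List String) (w : String) : List String × List String :=
  let pending := st.2 ++ [w]
  if RANK_TITLES.contains (PySem.Str.lower w) then (st.1 ++ pending, []) else (st.1, pending)

def extract_rank_and_remainder_py_alt (title : String) : Option (String × String) :=
  let words := PySem.Str.split₀ title
  let st := words.foldl altStep ([], [])
  if st.1.isEmpty then none
  else
    let rank := PySem.Str.join " " st.1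
    let department := PySem.Str.join " " st.2
    let department :=
      if PySem.Str.startswith (PySem.Str.lower department) "of " then
        PySem.Str.slice department (some 3) none
      else department
    some (rank, department)

-- ===== PRECONDITION & SPEC =====
def Spec_extract_rank_and_remainder_py (title : String) (out : Option (String × String)) : Prop := out = extract_rank_and_remainder_py_alt title
instance (title : String) (out : Option (String × String)) : Decidable (Spec_extract_rank_and_remainder_py title out) := by unfold Spec_extract_rank_and_remainder_py; infer_instance

-- ===== CLAIM (what is proved, stated in full; the proofs are below) =====
def Claim_equal_extract_rank_and_remainder_py : Prop := ∀ (title : String), Dom_extract_rank_and_remainder_py title → Spec_extract_rank_and_remainder_py title (extract_rank_and_remainder_py title)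

-- ===== LEMMAS AND PROOFS =====

-- proof-only helper: position (from the front) of the last rank word, read off a reversed list
def lastRankIndexAux : List String → Option Nat
  | [] => none
  | w :: t =>
    if RANK_TITLES.contains (PySem.Str.lower w) then some t.length else lastRankIndexAux t

lemma lastRankIndexAux_lt_length :
    ∀ (l : List String) (j : Nat), lastRankIndexAux l = some j → j < l.length := by
  intro l
  induction l with
  | nil => intro j h; simp [lastRankIndexAux] at h
  | cons w t ih =>
    intro j h
    unfold lastRankIndexAux at h
    by_cases hp : RANK_TITLES.contains (PySem.Str.lower w)
    · simp only [hp, if_pos] at h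
      cases h; simp
    · simp only [hp, Bool.false_eq_true, if_neg, not_false_iff] at h
      have := ih j h
      simp only [List.length_cons]; omega

-- every index produced by the enumerate(…, s) comprehension lies in [s, s + len)
lemma mem_matches_bounds (p : String → Bool) :
    ∀ (ws : List String) (s i : Int),
      i ∈ (PySem.List.enumerate ws s).filterMap
            (fun iw => if p iw.2 then some iw.1 else none) →
      s ≤ i ∧ i < s + ws.length := by
  intro ws
  induction ws with
  | nil => intro s i h; simp [PySem.List.enumerate] at h
  | cons w t ih =>
    intro s i h
    simp only [PySem.List.enumerate, List.filterMap_cons] at h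
    by_cases hp : p w
    · simp only [hp, if_pos] at h
      rcases List.mem_cons.mp h with rfl | h
      · refine ⟨le_refl _, ?_⟩
        simp only [List.length_cons]; push_cast; omega
      · have := ih (s + 1) i h
        simp only [List.length_cons] at this ⊢
        push_cast at this ⊢
        omega
    · simp only [hp, Bool.false_eq_true, if_neg, not_false_iff] at h
      have := ih (s + 1) i h
      simp only [List.length_cons] at this ⊢
      push_cast at this ⊢
      omega

-- A's max-of-matching-indices equals the last rank position (shifted by the 1-based start)
lemma max_matches_eq (ws : List String) :
    PySem.List.max?
      ((PySem.List.enumerate ws 1).filterMap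
        (fun iw => if RANK_TITLES.contains (PySem.Str.lower iw.2) then some iw.1 else none))
      (fun i => i)
    = (lastRankIndexAux ws.reverse).map (fun j => ((j + 1 : Nat) : Int)) := by
  induction ws using List.reverseRecOn with
  | nil => simp [PySem.List.enumerate, PySem.List.max?, lastRankIndexAux]
  | append_singleton ws w ih =>
    rw [PySem.List.enumerate_append, List.filterMap_append, List.reverse_append]
    simp only [List.reverse_singleton, List.singleton_append, lastRankIndexAux,
      PySem.List.enumerate, List.filterMap_cons, List.filterMap_nil]
    by_cases hp : RANK_TITLES.contains (PySem.Str.lower w)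
    · simp only [hp, if_pos]
      cases hm : PySem.List.max?
          ((PySem.List.enumerate ws 1).filterMap
            (fun iw => if RANK_TITLES.contains (PySem.Str.lower iw.2) then some iw.1 else none))
          (fun i => i) with
      | none =>
        rw [PySem.List.max?_eq_none_iff] at hm
        rw [hm]
        simp only [List.nil_append, PySem.List.max?, List.foldl_cons,
          List.foldl_nil, List.length_reverse, Option.map_some]
        congr 1
        push_cast
        ring
      | some m =>
        have hmem := PySem.List.max?_mem hm
        have hb := mem_matches_bounds (fun w => RANK_TITLES.contains (PySem.Str.lower w)) ws 1 m hmem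
        have hlt : m < 1 + (ws.length : Int) := hb.2
        unfold PySem.List.max? at hm ⊢
        rw [List.foldl_append, hm]
        simp only [List.foldl_cons, List.foldl_nil, List.length_reverse, Option.map_some]
        rw [if_pos (show (fun i : Int => i) m < (fun i : Int => i) (1 + (ws.length : Int)) from hlt)]
        congr 1
        push_cast
        ring
    · simp only [hp, Bool.false_eq_true, if_neg, not_false_iff, List.append_nil]
      exact ih

-- B's two-accumulator fold computes the split at the last rank position
lemma foldl_altStep_eq :
    ∀ (ws r p : List String),
      ws.foldl altStep (r, p)
      = match lastRankIndexAux ws.reverse with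
        | none => (r, p ++ ws)
        | some j => (r ++ p ++ ws.take (j + 1), ws.drop (j + 1)) := by
  intro ws
  induction ws using List.reverseRecOn with
  | nil => intro r p; simp [lastRankIndexAux]
  | append_singleton ws w ih =>
    intro r p
    rw [List.foldl_append, ih]
    rw [List.reverse_append]
    simp only [List.reverse_singleton, List.singleton_append, lastRankIndexAux,
      List.length_reverse, List.foldl_cons, List.foldl_nil]
    have ht : List.take (ws.length + 1) (ws ++ [w]) = ws ++ [w] :=
      List.take_of_length_le (by simp)
    have hd : List.drop (ws.length + 1) (ws ++ [w]) = [] :=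
      List.drop_of_length_le (by simp)
    cases hl : lastRankIndexAux ws.reverse with
    | none =>
      by_cases hp : PySem.Str.lower w ∈ RANK_TITLES
      · simp [altStep, hp, ht, hd, List.append_assoc]
      · simp [altStep, hp, List.append_assoc]
    | some j =>
      have hj : j < ws.length := by
        have := lastRankIndexAux_lt_length ws.reverse j hl
        simpa using this
      by_cases hp : PySem.Str.lower w ∈ RANK_TITLES
      · simp only [altStep, hp, if_pos, ht, hd, List.contains_eq_mem, decide_eq_true_eq]
        refine congrArg (fun l => (l, ([] : List String))) ?_
        simp only [← List.append_assoc]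
        rw [List.append_assoc (r ++ p), List.take_append_drop]
      · simp only [altStep, hp, List.contains_eq_mem, decide_eq_true_eq, if_neg, not_false_iff]
        rw [List.take_append_of_le_length (by omega), List.drop_append_of_le_length (by omega)]

-- ===== VERDICT (by name: the statement is the Claim_ definition above) =====
theorem extract_rank_and_remainder_py_spec : Claim_equal_extract_rank_and_remainder_py := by
  intro title _
  unfold Spec_extract_rank_and_remainder_py
  simp only [extract_rank_and_remainder_py, extract_rank_and_remainder_py_alt]
  rw [max_matches_eq, foldl_altStep_eq]
  cases h : lastRankIndexAux (PySem.Str.split₀ title).reverse with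
  | none => simp
  | some j =>
    have hj : j < (PySem.Str.split₀ title).length := by
      have := lastRankIndexAux_lt_length (PySem.Str.split₀ title).reverse j h
      simpa using this
    have hne : ((PySem.Str.split₀ title).take (j + 1)) ≠ [] := by
      simp only [ne_eq, List.take_eq_nil_iff]
      rintro (h1 | h2)
      · omega
      · rw [h2] at hj; simp at hj
    have hE : ((PySem.Str.split₀ title).take (j + 1)).isEmpty = false := by
      simpa [List.isEmpty_iff] using hne
    simp only [Option.map_some, List.nil_append, hE, Bool.false_eq_true, if_false]
    rw [PySem.List.slice_to_natCast, PySem.List.slice_from_natCast]
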